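-- pv_equiv track=rewrite | github.com/TheOddlySeagull/Trin-Pack-Creator | generate_specular_maps.py | map_pixel_color
-- ===== SOURCE A (Python) =====
-- COLOR_MAP = {
--     "#99CCCC": "#FFFFFF",
--     "#B8B7B5": "#999999",
--     "#989794": "#999999",
--     "#444444": "#808080",
--     "#686868": "#808080",
--     "#E6E6E6": "#808080",
--     "#99FFFF": "#808080",
--     "#FF0000": "#808080",
--     "#B70000": "#808080",
--     "#874920": "#808080",
--     "#CC3300": "#0C0C0C",
--     "#FFCC00": "#0C0C0C",
--     "#FFFFCC": "#0C0C0C",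
--     "#990000": "#0C0C0C",
--     "#191919": "#0C0C0C",
--     "#111111": "#0C0C0C",
--     "#050505": "#0C0C0C",
--     "#070707": "#0C0C0C",
--     "#0F0F0F": "#0C0C0C",
--     "#142168": "#0C0C0C",
--     "#191819": "#0C0C0C",
--     "#1A1A1A": "#0C0C0C",
--     "#271101": "#0C0C0C",
--     "#361701": "#0C0C0C",
--     "#3A3A3A": "#0C0C0C",
--     "#424242": "#0C0C0C",
--     "#472916": "#0C0C0C",
--     "#515151": "#0C0C0C",
--     "#521A1C": "#0C0C0C",
--     "#666666": "#0C0C0C",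
--     "#802625": "#0C0C0C",
--     "#828282": "#0C0C0C",
--     "#BFBFBF": "#0C0C0C",
--     "#CCCCCC": "#0C0C0C",
--     "#CEBC68": "#0C0C0C",
--     "#E5E5E5": "#0C0C0C",
--     "#EEE8C9": "#0C0C0C",
--     "#FEF6D6": "#0C0C0C",
-- }
--
-- DEFAULT_COLOR = "#666666"
--
-- NOISE_TOLERANCE = 3
--
-- def hex_to_rgb(hex_color):
--     hex_color = hex_color.lstrip("#")
--     return tuple(int(hex_color[i:i + 2], 16) for i in (0, 2, 4))
--
-- def color_within_tolerance(pixel_rgb, target_rgb, tolerance):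
--     return all(abs(p - t) <= tolerance for p, t in zip(pixel_rgb, target_rgb))
--
-- def map_pixel_color(pixel_rgb):
--     matched_colors = []
--     for k_hex, v_hex in COLOR_MAP.items():
--         target_rgb = hex_to_rgb(k_hex)
--         if color_within_tolerance(pixel_rgb, target_rgb, NOISE_TOLERANCE):
--             matched_colors.append(hex_to_rgb(v_hex))
--     if matched_colors:
--         # Choose the darkest color (lowest sum of RGB values)
--         return min(matched_colors, key=lambda rgb: sum(rgb))
--     return hex_to_rgb(DEFAULT_COLOR)
-- ===== SOURCE B (Python) =====
-- # Table-driven rewrite: the COLOR_MAP is precompiled into RGB groups ordered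
-- # darkest-first, so lookup is an early-exit scan with no hex parsing at runtime.
--
-- NOISE_TOLERANCE = 3
-- DEFAULT_RGB = (102, 102, 102)
--
-- # (specular value rgb, [source key rgbs]) ordered by ascending RGB sum of the value
-- SPECULAR_GROUPS = [
--     ((12, 12, 12), [(204, 51, 0), (255, 204, 0), (255, 255, 204), (153, 0, 0),
--                     (25, 25, 25), (17, 17, 17), (5, 5, 5), (7, 7, 7),
--                     (15, 15, 15), (20, 33, 104), (25, 24, 25), (26, 26, 26),
--                     (39, 17, 1), (54, 23, 1), (58, 58, 58), (66, 66, 66),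
--                     (71, 41, 22), (81, 81, 81), (82, 26, 28), (102, 102, 102),
--                     (128, 38, 37), (130, 130, 130), (191, 191, 191),
--                     (204, 204, 204), (206, 188, 104), (229, 229, 229),
--                     (238, 232, 201), (254, 246, 214)]),
--     ((128, 128, 128), [(68, 68, 68), (104, 104, 104), (230, 230, 230),
--                        (153, 255, 255), (255, 0, 0), (183, 0, 0), (135, 73, 32)]),
--     ((153, 153, 153), [(184, 183, 181), (152, 151, 148)]),
--     ((255, 255, 255), [(153, 204, 204)]),
-- ]
--
--
-- def map_pixel_color(pixel_rgb):
--     r, g, b = pixel_rgb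
--     for value_rgb, keys in SPECULAR_GROUPS:
--         for kr, kg, kb in keys:
--             if abs(r - kr) <= NOISE_TOLERANCE and abs(g - kg) <= NOISE_TOLERANCE \
--                     and abs(b - kb) <= NOISE_TOLERANCE:
--                 return value_rgb
--     return DEFAULT_RGB
-- ===== Notes on version B (the rewrite author's own statement) =====
-- stated objective: alternative
-- what changed: B replaces the runtime scan of COLOR_MAP with hex parsing plus collect-all-then-min by a precompiled RGB table grouping source keys under their specular value, ordered darkest-first, scanned with an early-exit nested loop that returns the first value whose group contains a key within tolerance.
import Mathlib
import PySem

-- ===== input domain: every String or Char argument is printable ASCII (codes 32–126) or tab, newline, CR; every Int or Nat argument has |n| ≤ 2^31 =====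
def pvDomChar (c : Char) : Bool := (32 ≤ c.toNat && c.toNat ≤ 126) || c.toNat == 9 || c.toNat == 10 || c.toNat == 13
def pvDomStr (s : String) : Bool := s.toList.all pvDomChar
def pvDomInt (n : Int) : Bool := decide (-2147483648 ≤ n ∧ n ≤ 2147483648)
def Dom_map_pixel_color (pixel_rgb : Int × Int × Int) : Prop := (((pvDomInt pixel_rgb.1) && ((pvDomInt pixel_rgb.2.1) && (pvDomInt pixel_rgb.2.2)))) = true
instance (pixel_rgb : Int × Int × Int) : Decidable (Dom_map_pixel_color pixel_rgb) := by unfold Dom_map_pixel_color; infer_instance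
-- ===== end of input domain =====

-- B precompiles COLOR_MAP into RGB groups keyed by specular value, ordered darkest-first,
-- and scans them with an early-exit nested loop (objective: alternative, table-driven).

-- ===== PORT A =====
-- COLOR_MAP as an insertion-ordered association list
def pvColorMap : List (String × String) := [
  ("#99CCCC", "#FFFFFF"), ("#B8B7B5", "#999999"), ("#989794", "#999999"),
  ("#444444", "#808080"), ("#686868", "#808080"), ("#E6E6E6", "#808080"),
  ("#99FFFF", "#808080"), ("#FF0000", "#808080"), ("#B70000", "#808080"),
  ("#874920", "#808080"), ("#CC3300", "#0C0C0C"), ("#FFCC00", "#0C0C0C"),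
  ("#FFFFCC", "#0C0C0C"), ("#990000", "#0C0C0C"), ("#191919", "#0C0C0C"),
  ("#111111", "#0C0C0C"), ("#050505", "#0C0C0C"), ("#070707", "#0C0C0C"),
  ("#0F0F0F", "#0C0C0C"), ("#142168", "#0C0C0C"), ("#191819", "#0C0C0C"),
  ("#1A1A1A", "#0C0C0C"), ("#271101", "#0C0C0C"), ("#361701", "#0C0C0C"),
  ("#3A3A3A", "#0C0C0C"), ("#424242", "#0C0C0C"), ("#472916", "#0C0C0C"),
  ("#515151", "#0C0C0C"), ("#521A1C", "#0C0C0C"), ("#666666", "#0C0C0C"),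
  ("#802625", "#0C0C0C"), ("#828282", "#0C0C0C"), ("#BFBFBF", "#0C0C0C"),
  ("#CCCCCC", "#0C0C0C"), ("#CEBC68", "#0C0C0C"), ("#E5E5E5", "#0C0C0C"),
  ("#EEE8C9", "#0C0C0C"), ("#FEF6D6", "#0C0C0C")]

-- hex_color.lstrip("#"): hand port, exact — PySem has no one-sided strip-with-chars; drops the leading '#' characters
def pvLstripHash (s : List Char) : List Char := s.dropWhile (· == '#')

-- hex_to_rgb; int(_, 16) is PySem.Int.ofCharsBase?; its none (ValueError) path is unreachable here:
-- A only applies hex_to_rgb to the valid module-literal hex colors, so .getD 0 is exact on every actual call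
def pvHexToRgb (hex_color : String) : Int × Int × Int :=
  let s := pvLstripHash hex_color.toList
  ((PySem.Int.ofCharsBase? (PySem.List.slice s (some 0) (some 2)) 16).getD 0,
   (PySem.Int.ofCharsBase? (PySem.List.slice s (some 2) (some 4)) 16).getD 0,
   (PySem.Int.ofCharsBase? (PySem.List.slice s (some 4) (some 6)) 16).getD 0)

-- color_within_tolerance: all(...) over zip of the two 3-tuples, unrolled into its three conjuncts (exact)
def pvWithinTol (p t : Int × Int × Int) (tol : Int) : Bool :=
  decide (|p.1 - t.1| ≤ tol) && decide (|p.2.1 - t.2.1| ≤ tol) && decide (|p.2.2 - t.2.2| ≤ tol)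

def map_pixel_color (pixel_rgb : Int × Int × Int) : Int × Int × Int :=
  let matched := pvColorMap.foldl
    (fun acc kv => if pvWithinTol pixel_rgb (pvHexToRgb kv.1) 3 then acc ++ [pvHexToRgb kv.2] else acc) []
  -- 'if matched_colors: return min(matched_colors, key=sum)': min? is none exactly on the empty list (the else branch)
  match PySem.List.min? matched (fun rgb => rgb.1 + rgb.2.1 + rgb.2.2) with
  | some m => m
  | none => pvHexToRgb "#666666"

-- ===== PORT B =====
-- SPECULAR_GROUPS: (specular value rgb, source key rgbs), ordered by ascending RGB sum of the value
def bSpecularGroups : List ((Int × Int × Int) × List (Int × Int × Int)) := [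
  ((12, 12, 12), [(204, 51, 0), (255, 204, 0), (255, 255, 204), (153, 0, 0),
                  (25, 25, 25), (17, 17, 17), (5, 5, 5), (7, 7, 7),
                  (15, 15, 15), (20, 33, 104), (25, 24, 25), (26, 26, 26),
                  (39, 17, 1), (54, 23, 1), (58, 58, 58), (66, 66, 66),
                  (71, 41, 22), (81, 81, 81), (82, 26, 28), (102, 102, 102),
                  (128, 38, 37), (130, 130, 130), (191, 191, 191),
                  (204, 204, 204), (206, 188, 104), (229, 229, 229),
                  (238, 232, 201), (254, 246, 214)]),
  ((128, 128, 128), [(68, 68, 68), (104, 104, 104), (230, 230, 230),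
                     (153, 255, 255), (255, 0, 0), (183, 0, 0), (135, 73, 32)]),
  ((153, 153, 153), [(184, 183, 181), (152, 151, 148)]),
  ((255, 255, 255), [(153, 204, 204)])]

-- the chained 'abs(r-kr) <= 3 and …' test of B's inner loop
def bHit (r g b : Int) (key : Int × Int × Int) : Bool :=
  decide ((r - key.1).natAbs ≤ 3) && decide ((g - key.2.1).natAbs ≤ 3) && decide ((b - key.2.2).natAbs ≤ 3)

def map_pixel_color_alt (pixel_rgb : Int × Int × Int) : Int × Int × Int :=
  -- r, g, b = pixel_rgb; nested for-loops with early return = find? over the groups, any over the keys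
  let r := pixel_rgb.1; let g := pixel_rgb.2.1; let b := pixel_rgb.2.2
  match bSpecularGroups.find? (fun grp => grp.2.any (bHit r g b)) with
  | some grp => grp.1
  | none => (102, 102, 102)

-- ===== PRECONDITION & SPEC =====
def Spec_map_pixel_color (pixel_rgb : Int × Int × Int) (out : Int × Int × Int) : Prop := out = map_pixel_color_alt pixel_rgb
instance (pixel_rgb : Int × Int × Int) (out : Int × Int × Int) : Decidable (Spec_map_pixel_color pixel_rgb out) := by unfold Spec_map_pixel_color; infer_instance

-- ===== CLAIM (what is proved, stated in full; the proofs are below) =====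
def Claim_equal_map_pixel_color : Prop := ∀ (pixel_rgb : Int × Int × Int), Dom_map_pixel_color pixel_rgb → Spec_map_pixel_color pixel_rgb (map_pixel_color pixel_rgb)

-- ===== LEMMAS AND PROOFS =====

-- the source-key rgb triples of each value color, in COLOR_MAP order
def pvG1 : List (Int × Int × Int) := [(204, 51, 0), (255, 204, 0), (255, 255, 204), (153, 0, 0), (25, 25, 25), (17, 17, 17), (5, 5, 5), (7, 7, 7), (15, 15, 15), (20, 33, 104), (25, 24, 25), (26, 26, 26), (39, 17, 1), (54, 23, 1), (58, 58, 58), (66, 66, 66), (71, 41, 22), (81, 81, 81), (82, 26, 28), (102, 102, 102), (128, 38, 37), (130, 130, 130), (191, 191, 191), (204, 204, 204), (206, 188, 104), (229, 229, 229), (238, 232, 201), (254, 246, 214)]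
def pvG2 : List (Int × Int × Int) := [(68, 68, 68), (104, 104, 104), (230, 230, 230), (153, 255, 255), (255, 0, 0), (183, 0, 0), (135, 73, 32)]
def pvG3 : List (Int × Int × Int) := [(184, 183, 181), (152, 151, 148)]
def pvG4 : List (Int × Int × Int) := [(153, 204, 204)]

-- COLOR_MAP with both columns decoded to rgb
def pvRGBMap : List ((Int × Int × Int) × (Int × Int × Int)) := [
  ((153, 204, 204), (255, 255, 255)), ((184, 183, 181), (153, 153, 153)), ((152, 151, 148), (153, 153, 153)),
  ((68, 68, 68), (128, 128, 128)), ((104, 104, 104), (128, 128, 128)), ((230, 230, 230), (128, 128, 128)),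
  ((153, 255, 255), (128, 128, 128)), ((255, 0, 0), (128, 128, 128)), ((183, 0, 0), (128, 128, 128)),
  ((135, 73, 32), (128, 128, 128)), ((204, 51, 0), (12, 12, 12)), ((255, 204, 0), (12, 12, 12)),
  ((255, 255, 204), (12, 12, 12)), ((153, 0, 0), (12, 12, 12)), ((25, 25, 25), (12, 12, 12)),
  ((17, 17, 17), (12, 12, 12)), ((5, 5, 5), (12, 12, 12)), ((7, 7, 7), (12, 12, 12)),
  ((15, 15, 15), (12, 12, 12)), ((20, 33, 104), (12, 12, 12)), ((25, 24, 25), (12, 12, 12)),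
  ((26, 26, 26), (12, 12, 12)), ((39, 17, 1), (12, 12, 12)), ((54, 23, 1), (12, 12, 12)),
  ((58, 58, 58), (12, 12, 12)), ((66, 66, 66), (12, 12, 12)), ((71, 41, 22), (12, 12, 12)),
  ((81, 81, 81), (12, 12, 12)), ((82, 26, 28), (12, 12, 12)), ((102, 102, 102), (12, 12, 12)),
  ((128, 38, 37), (12, 12, 12)), ((130, 130, 130), (12, 12, 12)), ((191, 191, 191), (12, 12, 12)),
  ((204, 204, 204), (12, 12, 12)), ((206, 188, 104), (12, 12, 12)), ((229, 229, 229), (12, 12, 12)),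
  ((238, 232, 201), (12, 12, 12)), ((254, 246, 214), (12, 12, 12))]

def pvM (p : Int × Int × Int) : List (Int × Int × Int) :=
  (pvRGBMap.filter (fun kv => pvWithinTol p kv.1 3)).map (·.2)

def pvC (p : Int × Int × Int) (g : List (Int × Int × Int)) : Bool :=
  g.any (fun kr => pvWithinTol p kr 3)

def pvCanon (p : Int × Int × Int) : Int × Int × Int :=
  if pvC p pvG1 then (12, 12, 12) else if pvC p pvG2 then (128, 128, 128)
  else if pvC p pvG3 then (153, 153, 153) else if pvC p pvG4 then (255, 255, 255)
  else (102, 102, 102)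

lemma pvRGBMap_eq : pvColorMap.map (fun kv => (pvHexToRgb kv.1, pvHexToRgb kv.2)) = pvRGBMap := by decide

lemma pvGroups_eq : bSpecularGroups = [((12, 12, 12), pvG1), ((128, 128, 128), pvG2), ((153, 153, 153), pvG3), ((255, 255, 255), pvG4)] := rfl

lemma pvHexD : pvHexToRgb "#666666" = (102, 102, 102) := by decide

lemma pvHit_eq (p : Int × Int × Int) (t : Int × Int × Int) :
    bHit p.1 p.2.1 p.2.2 t = pvWithinTol p t 3 := by
  unfold bHit pvWithinTol
  have h : ∀ a : Int, decide (a.natAbs ≤ 3) = decide (|a| ≤ 3) := by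
    intro a; rw [decide_eq_decide, Int.abs_eq_natAbs]; omega
  rw [h, h, h]

lemma pvB_eq (p : Int × Int × Int) : map_pixel_color_alt p = pvCanon p := by
  unfold map_pixel_color_alt pvCanon
  rw [pvGroups_eq]
  have hf : ∀ g : List (Int × Int × Int), g.any (bHit p.1 p.2.1 p.2.2) = pvC p g := by
    intro g; unfold pvC; congr 1; funext x; exact pvHit_eq p x
  simp only [List.find?, hf]
  cases h1 : pvC p pvG1 <;> cases h2 : pvC p pvG2 <;> cases h3 : pvC p pvG3 <;> cases h4 : pvC p pvG4 <;>
    simp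

lemma pvMatched_eq (p : Int × Int × Int) :
    pvColorMap.foldl (fun acc kv => if pvWithinTol p (pvHexToRgb kv.1) 3 then acc ++ [pvHexToRgb kv.2] else acc) [] = pvM p := by
  refine (PySem.List.foldl_append_if (fun kv : String × String => pvWithinTol p (pvHexToRgb kv.1) 3)
    (fun kv : String × String => pvHexToRgb kv.2) pvColorMap []).trans ?_
  simp only [List.nil_append, pvM, ← pvRGBMap_eq, List.filter_map, List.map_map]
  rfl

lemma pvSub (p : Int × Int × Int) : ∀ x ∈ pvM p,
    x = ((12, 12, 12) : Int × Int × Int) ∨ x = (128, 128, 128) ∨ x = (153, 153, 153) ∨ x = (255, 255, 255) := by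
  intro x hx
  obtain ⟨y, hy, rfl⟩ := List.mem_map.mp hx
  have h2 : y ∈ pvRGBMap := (List.mem_filter.mp hy).1
  have hall : ∀ z ∈ pvRGBMap,
      z.2 = ((12, 12, 12) : Int × Int × Int) ∨ z.2 = (128, 128, 128) ∨ z.2 = (153, 153, 153) ∨ z.2 = (255, 255, 255) := by decide
  exact hall y h2

lemma pvMem1 (p : Int × Int × Int) : ((12, 12, 12) : Int × Int × Int) ∈ pvM p ↔ pvC p pvG1 = true := by
  simp [pvM, pvC, pvRGBMap, pvG1]
lemma pvMem2 (p : Int × Int × Int) : ((128, 128, 128) : Int × Int × Int) ∈ pvM p ↔ pvC p pvG2 = true := by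
  simp [pvM, pvC, pvRGBMap, pvG2]
lemma pvMem3 (p : Int × Int × Int) : ((153, 153, 153) : Int × Int × Int) ∈ pvM p ↔ pvC p pvG3 = true := by
  simp [pvM, pvC, pvRGBMap, pvG3]
lemma pvMem4 (p : Int × Int × Int) : ((255, 255, 255) : Int × Int × Int) ∈ pvM p ↔ pvC p pvG4 = true := by
  simp [pvM, pvC, pvRGBMap, pvG4]

-- min by RGB sum over a list whose elements are among the four value colors picks the darkest one present
lemma pvMinChain (M : List (Int × Int × Int))
    (h : ∀ x ∈ M, x = ((12, 12, 12) : Int × Int × Int) ∨ x = (128, 128, 128) ∨ x = (153, 153, 153) ∨ x = (255, 255, 255)) :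
    PySem.List.min? M (fun rgb => rgb.1 + rgb.2.1 + rgb.2.2) =
      if ((12, 12, 12) : Int × Int × Int) ∈ M then some (12, 12, 12)
      else if ((128, 128, 128) : Int × Int × Int) ∈ M then some (128, 128, 128)
      else if ((153, 153, 153) : Int × Int × Int) ∈ M then some (153, 153, 153)
      else if ((255, 255, 255) : Int × Int × Int) ∈ M then some (255, 255, 255)
      else none := by
  split_ifs with h1 h2 h3 h4
  case _ | _ | _ | _ =>
    have hne : M ≠ [] := by
      intro hnil; subst hnil; simp_all
    cases hm : PySem.List.min? M (fun rgb => rgb.1 + rgb.2.1 + rgb.2.2) with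
    | none => exact absurd ((PySem.List.min?_eq_none_iff _ _).mp hm) hne
    | some m =>
      have hmem := PySem.List.min?_mem hm
      have hmin := PySem.List.min?_isMin hm
      rcases h m hmem with rfl | rfl | rfl | rfl <;>
        first
          | rfl
          | exact absurd hmem h1
          | exact absurd hmem h2
          | exact absurd hmem h3
          | exact absurd (hmin _ h1) (by norm_num)
          | exact absurd (hmin _ h2) (by norm_num)
          | exact absurd (hmin _ h3) (by norm_num)
  case _ =>
    have hnil : M = [] := by
      cases M with
      | nil => rfl
      | cons x t =>
        rcases h x (by simp) with rfl | rfl | rfl | rfl <;> simp_all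
    rw [hnil]
    simp [PySem.List.min?]

lemma pvA_eq (p : Int × Int × Int) : map_pixel_color p = pvCanon p := by
  unfold map_pixel_color
  rw [pvMatched_eq]
  show (match PySem.List.min? (pvM p) (fun rgb => rgb.1 + rgb.2.1 + rgb.2.2) with
        | some m => m
        | none => pvHexToRgb "#666666") = pvCanon p
  rw [pvMinChain _ (pvSub p)]
  simp only [pvMem1, pvMem2, pvMem3, pvMem4, pvCanon, pvHexD]
  cases h1 : pvC p pvG1 <;> cases h2 : pvC p pvG2 <;> cases h3 : pvC p pvG3 <;> cases h4 : pvC p pvG4 <;>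
    simp

-- ===== VERDICT (by name: the statement is the Claim_ definition above) =====
theorem map_pixel_color_spec : Claim_equal_map_pixel_color := by
  intro p _
  unfold Spec_map_pixel_color
  rw [pvA_eq, pvB_eq]
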